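-- pv_equiv track=rewrite | github.com/Theworldzyours/TRADE_SOURCER | src/signals/ftd_tracker.py | _check_threshold_list
-- ===== SOURCE A (Python) =====
-- from typing import Dict, List, Optional
--
-- THRESHOLD_LIST_DAYS = 13
--
-- def _check_threshold_list(quantities: List[int]) -> bool:
--     """
--     Check if the stock qualifies for SEC Threshold List.
--
--     Requires 13+ consecutive settlement days with FTD quantity >= 10000.
--     """
--     if len(quantities) < THRESHOLD_LIST_DAYS:
--         return False
--
--     consecutive = 0
--     for q in quantities:
--         if q >= 10000:
--             consecutive += 1
--             if consecutive >= THRESHOLD_LIST_DAYS: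
--                 return True
--         else:
--             consecutive = 0
--     return False
-- ===== SOURCE B (Python) =====
-- THRESHOLD_LIST_DAYS = 13
--
-- def _check_threshold_list(quantities):
--     """True iff some window of 13 consecutive days all have quantity >= 10000."""
--     return any(
--         all(q >= 10000 for q in quantities[i:i + THRESHOLD_LIST_DAYS])
--         for i in range(len(quantities) - (THRESHOLD_LIST_DAYS - 1))
--     )
-- ===== Notes on version B (the rewrite author's own statement) =====
-- stated objective: alternative
-- what changed: Replaces the resetting running counter (with its len<13 pre-guard and early exit) by a brute-force window existence check: B asks whether any of the n-12 windows of 13 consecutive days consists entirely of quantities >= 10000.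
import Mathlib
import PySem

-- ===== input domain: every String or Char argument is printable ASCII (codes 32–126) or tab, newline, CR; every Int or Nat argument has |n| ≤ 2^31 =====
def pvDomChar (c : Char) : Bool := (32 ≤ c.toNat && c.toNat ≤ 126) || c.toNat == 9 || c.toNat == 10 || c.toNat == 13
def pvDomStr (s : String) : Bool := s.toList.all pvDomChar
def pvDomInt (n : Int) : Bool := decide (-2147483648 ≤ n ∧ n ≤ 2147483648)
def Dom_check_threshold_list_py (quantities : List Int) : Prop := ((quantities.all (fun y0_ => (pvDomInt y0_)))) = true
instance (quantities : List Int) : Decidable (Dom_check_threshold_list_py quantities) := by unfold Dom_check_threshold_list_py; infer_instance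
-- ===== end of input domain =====

-- B replaces A's resetting running counter by a brute-force window existence check
-- (is there a window of 13 consecutive days all >= 10000?); same return value, O(13n).
-- ===== PORT A =====
def ctlGoA : List Int → Nat → Bool
  | [], _ => false
  | q :: rest, c =>
    if 10000 ≤ q then
      if c + 1 ≥ 13 then true else ctlGoA rest (c + 1)
    else ctlGoA rest 0

def check_threshold_list_py (quantities : List Int) : Bool :=
  if quantities.length < 13 then false else ctlGoA quantities 0

-- ===== PORT B =====
-- range(len - 12): empty when len < 13, matched exactly by Nat truncated subtraction;
-- quantities[i:i+13] with 0 ≤ i is exactly (drop i).take 13.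
def check_threshold_list_py_alt (quantities : List Int) : Bool :=
  (List.range (quantities.length - 12)).any (fun i =>
    ((quantities.drop i).take 13).all (fun q => decide (10000 ≤ q)))

-- ===== PRECONDITION & SPEC =====
def Spec_check_threshold_list_py (quantities : List Int) (out : Bool) : Prop := out = check_threshold_list_py_alt quantities
instance (quantities : List Int) (out : Bool) : Decidable (Spec_check_threshold_list_py quantities out) := by unfold Spec_check_threshold_list_py; infer_instance

-- ===== CLAIM (what is proved, stated in full; the proofs are below) =====
def Claim_equal_check_threshold_list_py : Prop := ∀ (quantities : List Int), Dom_check_threshold_list_py quantities → Spec_check_threshold_list_py quantities (check_threshold_list_py quantities)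

-- ===== LEMMAS AND PROOFS =====

-- B on empty-or-short input
theorem alt_short (qs : List Int) (h : qs.length < 13) :
    check_threshold_list_py_alt qs = false := by
  unfold check_threshold_list_py_alt
  have : qs.length - 12 = 0 := by omega
  simp [this]

-- unfolding B at a cons cell: window at 0, or a window inside the tail
theorem alt_cons (q : Int) (rest : List Int) :
    check_threshold_list_py_alt (q :: rest) =
      ((decide (12 ≤ rest.length) && ((q :: rest).take 13).all (fun x => decide (10000 ≤ x)))
        || check_threshold_list_py_alt rest) := by
  unfold check_threshold_list_py_alt
  by_cases h : 12 ≤ rest.length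
  · have h1 : (q :: rest).length - 12 = (rest.length - 12) + 1 := by
      simp only [List.length_cons]; omega
    rw [h1, List.range_succ_eq_map]
    simp [List.any_cons, List.any_map, Function.comp_def, List.drop_succ_cons, h]
  · have h1 : (q :: rest).length - 12 = 0 := by simp only [List.length_cons]; omega
    have h2 : rest.length - 12 = 0 := by omega
    rw [h1, h2]
    simp [h]

-- a leading qualifying run of length ≥ 13 gives a window at 0
theorem tw_anyWin (qs : List Int)
    (h : 13 ≤ (qs.takeWhile (fun x => decide ((10000:Int) ≤ x))).length) :
    check_threshold_list_py_alt qs = true := by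
  unfold check_threshold_list_py_alt
  have hlen : 13 ≤ qs.length :=
    le_trans h (List.takeWhile_sublist _).length_le
  have hr : 0 ∈ List.range (qs.length - 12) := by
    rw [List.mem_range]; omega
  rw [List.any_eq_true]
  refine ⟨0, hr, ?_⟩
  rw [List.drop_zero, List.all_eq_true]
  intro x hx
  have htk : qs.take 13 = (qs.takeWhile (fun x => decide ((10000:Int) ≤ x))).take 13 := by
    conv_lhs => rw [← List.takeWhile_append_dropWhile (p := fun x => decide ((10000:Int) ≤ x)) (l := qs)]
    rw [List.take_append_of_le_length h]
  rw [htk] at hx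
  have hx' : x ∈ qs.takeWhile (fun x => decide ((10000:Int) ≤ x)) :=
    List.mem_of_mem_take hx
  exact List.mem_takeWhile_imp (p := fun x => decide ((10000:Int) ≤ x)) hx'

-- all of take 13 qualifying (with enough length) means the leading run is ≥ 13
theorem all_take_tw (p : Int → Bool) : ∀ (qs : List Int) (n : Nat), n ≤ qs.length →
    (qs.take n).all p = true → n ≤ (qs.takeWhile p).length
  | _, 0, _, _ => Nat.zero_le _
  | [], n+1, h, _ => by simp at h
  | q :: rest, n+1, h, hall => by
    simp only [List.take_succ_cons, List.all_cons, Bool.and_eq_true] at hall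
    simp only [List.takeWhile_cons, hall.1, if_true, List.length_cons]
    exact Nat.succ_le_succ (all_take_tw p rest n (by simpa using h) hall.2)

-- main invariant: the counter loop with credit c < 13 succeeds iff the leading run
-- completes the count or some window of 13 lies wholly inside qs
theorem ctlGoA_eq (qs : List Int) : ∀ c : Nat, c < 13 →
    ctlGoA qs c =
      (decide (13 ≤ c + (qs.takeWhile (fun x => decide ((10000:Int) ≤ x))).length)
        || check_threshold_list_py_alt qs) := by
  induction qs with
  | nil =>
    intro c hc
    have : ¬ (13 ≤ c + ([] : List Int).length) := by simp; omega
    simp [ctlGoA, check_threshold_list_py_alt]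
    omega
  | cons q rest ih =>
    intro c hc
    by_cases hq : (10000:Int) ≤ q
    · have htw : (q :: rest).takeWhile (fun x => decide ((10000:Int) ≤ x)) =
          q :: rest.takeWhile (fun x => decide ((10000:Int) ≤ x)) := by simp [hq]
      by_cases h13 : c + 1 ≥ 13
      · -- c = 12: counter completes immediately
        have hA : ctlGoA (q :: rest) c = true := by simp [ctlGoA, hq, h13]
        have hd : (13 ≤ c + ((q :: rest).takeWhile (fun x => decide ((10000:Int) ≤ x))).length) := by
          rw [htw]; simp only [List.length_cons]; omega
        simp [hA, hd]
      · have hA : ctlGoA (q :: rest) c = ctlGoA rest (c + 1) := by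
          simp [ctlGoA, hq, h13]
        rw [hA, ih (c + 1) (by omega), alt_cons, htw]
        simp only [List.length_cons]
        have heq : (13 ≤ c + 1 + (rest.takeWhile (fun x => decide ((10000:Int) ≤ x))).length) ↔
            (13 ≤ c + ((rest.takeWhile (fun x => decide ((10000:Int) ≤ x))).length + 1)) := by omega
        -- the window-at-0 disjunct is absorbed by the counter disjunct
        by_cases hw : (decide (12 ≤ rest.length) &&
            ((q :: rest).take 13).all (fun x => decide (10000 ≤ x))) = true
        · have h12 : 12 ≤ rest.length := by
            by_contra hcon
            simp [hcon] at hw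
          have hall : ((q :: rest).take 13).all (fun x => decide ((10000:Int) ≤ x)) = true := by
            cases hA2 : ((q :: rest).take 13).all (fun x => decide ((10000:Int) ≤ x)) with
            | true => rfl
            | false => rw [hA2] at hw; simp at hw
          have htw13 : 13 ≤ ((q :: rest).takeWhile (fun x => decide ((10000:Int) ≤ x))).length :=
            all_take_tw _ (q :: rest) 13 (by simp only [List.length_cons]; omega) hall
          rw [htw] at htw13
          simp only [List.length_cons] at htw13
          have hd1 : (13 ≤ c + 1 + (rest.takeWhile (fun x => decide ((10000:Int) ≤ x))).length) := by
            omega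
          have hd2 : (13 ≤ c + ((rest.takeWhile (fun x => decide ((10000:Int) ≤ x))).length + 1)) := by
            omega
          simp [hd1, hd2]
        · rw [Bool.eq_false_iff.mpr hw]
          simp only [Bool.false_or]
          congr 1
          simp [heq]
    · have htw : (q :: rest).takeWhile (fun x => decide ((10000:Int) ≤ x)) = [] := by
        simp [hq]
      have hA : ctlGoA (q :: rest) c = ctlGoA rest 0 := by simp [ctlGoA, hq]
      rw [hA, ih 0 (by omega), alt_cons, htw]
      have hmem : q ∈ (q :: rest).take 13 := by
        rw [show (13:Nat) = 12 + 1 from rfl, List.take_succ_cons]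
        exact List.mem_cons_self ..
      have hallf : ((q :: rest).take 13).all (fun x => decide (10000 ≤ x)) = false := by
        rw [List.all_eq_false]
        exact ⟨q, hmem, by simp [hq]⟩
      have hw0 : (decide (12 ≤ rest.length) &&
          ((q :: rest).take 13).all (fun x => decide (10000 ≤ x))) = false := by
        rw [hallf, Bool.and_false]
      rw [hw0]
      simp only [Bool.false_or, List.length_nil, Nat.add_zero, Nat.zero_add]
      have hcf : ¬ (13 ≤ c) := by omega
      by_cases h0 : 13 ≤ (rest.takeWhile (fun x => decide ((10000:Int) ≤ x))).length
      · rw [tw_anyWin rest h0]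
        simp [hcf]
      · simp [h0, hcf]

-- ===== VERDICT (by name: the statement is the Claim_ definition above) =====
theorem check_threshold_list_py_spec : Claim_equal_check_threshold_list_py := by
  intro qs _
  unfold Spec_check_threshold_list_py check_threshold_list_py
  by_cases hl : qs.length < 13
  · rw [if_pos hl, alt_short qs hl]
  · rw [if_neg hl, ctlGoA_eq qs 0 (by omega)]
    simp only [Nat.zero_add]
    by_cases h : 13 ≤ (qs.takeWhile (fun x => decide ((10000:Int) ≤ x))).length
    · simp [h, tw_anyWin qs h]
    · simp [h]
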